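-- pv_equiv track=rewrite | github.com/brmanuel/aoc23 | 3/solve.py | merge_adjacent_coords
-- ===== SOURCE A (Python) =====
-- def should_merge(number, number_range):
--     i,j = number
--     a,b,c,d = number_range
--     return i == a and i == c and j == d+1
--
-- def merge_adjacent_coords(coords):
--     coords_merged = [[coords[0][0], coords[0][1], coords[0][0], coords[0][1]]]
--     for coord in coords[1:]:
--         if should_merge(coord, coords_merged[-1]):
--             coords_merged[-1][2] = coord[0]
--             coords_merged[-1][3] = coord[1]
--         else:
--             coords_merged.append([coord[0],coord[1],coord[0],coord[1]])
--     return coords_merged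
-- ===== SOURCE B (Python) =====
-- def merge_adjacent_coords(coords):
--     # Index-based staged passes: (1) compute the break positions (indices where a
--     # new range must start), (2) pair consecutive boundaries and read the range
--     # endpoints off coords by direct indexing.  No range is ever built and mutated.
--     n = len(coords)
--     breaks = [k for k in range(n)
--               if k == 0
--               or coords[k][0] != coords[k-1][0]
--               or coords[k][1] != coords[k-1][1] + 1]
--     breaks.append(n)
--     return [[coords[s][0], coords[s][1], coords[e-1][0], coords[e-1][1]]
--             for s, e in zip(breaks, breaks[1:])]
-- ===== Notes on version B (the rewrite author's own statement) =====
-- stated objective: alternative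
-- what changed: A builds the result in one pass, mutating the last 4-element range in place per coordinate; B never merges: it first computes the list of break indices where a new run starts, then zips consecutive boundaries and reads each range's endpoints off coords by direct indexing.
import Mathlib
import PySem

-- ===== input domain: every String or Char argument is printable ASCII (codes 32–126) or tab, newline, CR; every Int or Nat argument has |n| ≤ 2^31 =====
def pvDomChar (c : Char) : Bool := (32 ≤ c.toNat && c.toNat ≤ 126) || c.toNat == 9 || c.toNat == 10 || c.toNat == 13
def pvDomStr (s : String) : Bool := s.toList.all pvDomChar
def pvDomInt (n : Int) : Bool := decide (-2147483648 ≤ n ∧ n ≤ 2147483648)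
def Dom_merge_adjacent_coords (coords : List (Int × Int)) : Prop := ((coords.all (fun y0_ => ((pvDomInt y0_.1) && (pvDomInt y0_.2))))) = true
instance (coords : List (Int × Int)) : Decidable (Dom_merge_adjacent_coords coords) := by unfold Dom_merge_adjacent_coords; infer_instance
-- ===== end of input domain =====

-- B replaces A's mutate-the-last-range pass by two staged index passes: collect the break
-- indices, then read each range off coords by direct indexing (objective: alternative).

-- ===== PORT A =====
def should_merge (number : Int × Int) (number_range : Int × Int × Int × Int) : Bool :=
  let (i, j) := number
  let (a, _b, c, d) := number_range
  i == a && i == c && j == d + 1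

-- A's loop: the last (mutated-in-place) range is carried as (a,b,c,d); finished ranges are emitted in order
def loopA : Int × Int × Int × Int → List (Int × Int) → List (List Int)
  | (a, b, c, d), [] => [[a, b, c, d]]
  | (a, b, c, d), coord :: rest =>
    if should_merge coord (a, b, c, d) then loopA (a, b, coord.1, coord.2) rest
    else [a, b, c, d] :: loopA (coord.1, coord.2, coord.1, coord.2) rest

def merge_adjacent_coords (coords : List (Int × Int)) : List (List Int) :=
  match coords with
  | [] => []   -- Python A raises IndexError here (coords[0]); excluded by Pre_
  | c :: rest => loopA (c.1, c.2, c.1, c.2) rest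

-- ===== PORT B =====
-- the comprehension filter 'k == 0 or coords[k][0] != coords[k-1][0] or coords[k][1] != coords[k-1][1] + 1';
-- pyGetD's default (0,0) is never read: k ranges over range(n) and for k = 0 the first disjunct short-circuits the value
def bBreak (coords : List (Int × Int)) (k : Int) : Bool :=
  k == 0 ||
    (PySem.List.pyGetD coords k (0, 0)).1 != (PySem.List.pyGetD coords (k - 1) (0, 0)).1 ||
    (PySem.List.pyGetD coords k (0, 0)).2 != (PySem.List.pyGetD coords (k - 1) (0, 0)).2 + 1

def merge_adjacent_coords_alt (coords : List (Int × Int)) : List (List Int) :=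
  let n : Int := coords.length
  let breaks := ((PySem.List.pyRange 0 n 1).filter (bBreak coords)) ++ [n]
  (breaks.zip (PySem.List.slice breaks (some 1) none)).map (fun se =>
    [(PySem.List.pyGetD coords se.1 (0, 0)).1, (PySem.List.pyGetD coords se.1 (0, 0)).2,
     (PySem.List.pyGetD coords (se.2 - 1) (0, 0)).1, (PySem.List.pyGetD coords (se.2 - 1) (0, 0)).2])

-- ===== PRECONDITION & SPEC =====
-- Pre_ excludes exactly the empty list, on which Python A raises IndexError at coords[0].
def Pre_merge_adjacent_coords (coords : List (Int × Int)) : Prop := coords ≠ []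
instance (coords : List (Int × Int)) : Decidable (Pre_merge_adjacent_coords coords) := by
  unfold Pre_merge_adjacent_coords; infer_instance

def pvWitness_merge_adjacent_coords : (List (Int × Int)) := [(1, 2), (1, 3)]

def Spec_merge_adjacent_coords (coords : List (Int × Int)) (out : List (List Int)) : Prop :=
  out = merge_adjacent_coords_alt coords
instance (coords : List (Int × Int)) (out : List (List Int)) :
    Decidable (Spec_merge_adjacent_coords coords out) := by
  unfold Spec_merge_adjacent_coords; infer_instance

-- ===== CLAIM (what is proved, stated in full; the proofs are below) =====
def Claim_equal_merge_adjacent_coords : Prop := ∀ (coords : List (Int × Int)), Dom_merge_adjacent_coords coords → Pre_merge_adjacent_coords coords → Spec_merge_adjacent_coords coords (merge_adjacent_coords coords)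

-- ===== LEMMAS AND PROOFS =====

-- proof-side vocabulary ------------------------------------------------------
-- adjacency of two consecutive coordinates (y directly continues p's run)
def adjB (p y : Int × Int) : Bool := y.1 == p.1 && y.2 == p.2 + 1

-- reference function: A's loop with the a = c invariant built in (s = run start, p = previous coord)
def outRef : (Int × Int) → (Int × Int) → List (Int × Int) → List (List Int)
  | s, p, [] => [[s.1, s.2, p.1, p.2]]
  | s, p, y :: t => if adjB p y then outRef s y t else [s.1, s.2, p.1, p.2] :: outRef y y t

-- break positions inside t (0-based), given the coordinate p preceding t
def bks : (Int × Int) → List (Int × Int) → List Nat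
  | _, [] => []
  | p, y :: t => if adjB p y then (bks y t).map (· + 1) else 0 :: (bks y t).map (· + 1)

-- walk the boundary list, pairing each boundary with the previous one
def pwalk (f : Nat × Nat → List Int) : List Nat → Nat → List (List Int)
  | [], _ => []
  | e :: r, a => f (a, e) :: pwalk f r e

-- A-side: loopA is outRef under the a = c invariant
lemma loopA_eq_outRef : ∀ (t : List (Int × Int)) (s p : Int × Int), s.1 = p.1 →
    loopA (s.1, s.2, p.1, p.2) t = outRef s p t := by
  intro t
  induction t with
  | nil => intro s p h; simp [loopA, outRef]
  | cons y t ih =>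
    intro s p h
    have hsm : should_merge y (s.1, s.2, p.1, p.2) = adjB p y := by
      obtain ⟨i, j⟩ := y
      simp only [should_merge, adjB, h]
      by_cases hi : i = p.1 <;> simp [hi]
    simp only [loopA, outRef, hsm]
    by_cases ha : adjB p y = true
    · have hy1 : y.1 = p.1 := by
        have := ha; simp [adjB] at this; exact this.1
      rw [if_pos ha, if_pos ha]
      have := ih s y (by rw [h, ← hy1])
      simpa using this
    · rw [if_neg ha, if_neg ha]
      have := ih y y rfl
      simp at this
      rw [this]

-- zip-with-tail is pwalk
lemma zip_tail_pwalk (f : Nat × Nat → List Int) :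
    ∀ (l : List Nat) (a : Nat), ((a :: l).zip l).map f = pwalk f l a := by
  intro l
  induction l with
  | nil => intro a; simp [pwalk]
  | cons e r ih => intro a; simp [pwalk, ih e]

-- the comprehension filter, at Nat index k+1, is the negation of adjacency
lemma bBreak_succ (coords : List (Int × Int)) (k : Nat) :
    bBreak coords ((k : Int) + 1) =
      !(adjB (coords.getD k (0, 0)) (coords.getD (k + 1) (0, 0))) := by
  have h1 : ((k : Int) + 1) = ((k + 1 : Nat) : Int) := by push_cast; ring
  have h2 : ((k : Int) + 1 - 1) = ((k : Nat) : Int) := by ring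
  simp only [bBreak, h2]
  rw [h1]
  simp only [PySem.List.pyGetD_natCast]
  have h3 : (((k + 1 : Nat) : Int) == 0) = false := by
    simp only [beq_eq_false_iff_ne, ne_eq]
    omega
  rw [h3]
  cases e1 : ((coords.getD (k + 1) (0, 0)).1 == (coords.getD k (0, 0)).1) <;>
    cases e2 : ((coords.getD (k + 1) (0, 0)).2 == (coords.getD k (0, 0)).2 + 1) <;>
      simp [adjB, bne]

-- the filtered index list is exactly the break positions
lemma filter_range_eq_bks : ∀ (t : List (Int × Int)) (p : Int × Int),
    (List.range t.length).filter
      (fun k => !(adjB (if k = 0 then p else t.getD (k - 1) (0, 0)) (t.getD k (0, 0)))) = bks p t := by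
  intro t
  induction t with
  | nil => intro p; simp [bks]
  | cons y t ih =>
    intro p
    rw [List.length_cons, List.range_succ_eq_map]
    rw [List.filter_cons]
    simp only [List.filter_map]
    have hcong : ∀ k : Nat,
        ((fun k => !(adjB (if k = 0 then p else (y :: t).getD (k - 1) (0, 0)) ((y :: t).getD k (0, 0)))) ∘ Nat.succ) k
        = (fun k => !(adjB (if k = 0 then y else t.getD (k - 1) (0, 0)) (t.getD k (0, 0)))) k := by
      intro k
      cases k with
      | zero => simp
      | succ m => simp
    rw [List.filter_congr (fun k _ => hcong k), ih y]
    by_cases ha : adjB p y = true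
    · simp [bks, ha]
    · simp [bks, ha]

-- extract an element of `full` through a drop equation
lemma getD_of_drop {full t : List (Int × Int)} {m : Nat} {y : Int × Int}
    (h : full.drop m = y :: t) : full.getD m (0, 0) = y := by
  have : full[m]? = some y := by
    have h0 : (full.drop m)[0]? = some y := by rw [h]; rfl
    rw [List.getElem?_drop] at h0; simpa using h0
  simp [List.getD, this]

-- core correspondence: walking the absolute boundary list reads off outRef
lemma pwalk_eq_outRef (full : List (Int × Int)) :
    ∀ (t : List (Int × Int)) (j sIdx : Nat) (s p : Int × Int),
    j < full.length → sIdx ≤ j → full.getD sIdx (0, 0) = s → full.getD j (0, 0) = p →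
    full.drop (j + 1) = t →
    pwalk (fun se =>
        [(PySem.List.pyGetD full (se.1 : Int) (0, 0)).1, (PySem.List.pyGetD full (se.1 : Int) (0, 0)).2,
         (PySem.List.pyGetD full ((se.2 : Int) - 1) (0, 0)).1, (PySem.List.pyGetD full ((se.2 : Int) - 1) (0, 0)).2])
      ((bks p t).map (fun k => k + (j + 1)) ++ [full.length]) sIdx = outRef s p t := by
  intro t
  induction t with
  | nil =>
    intro j sIdx s p hj hsj hs hp hdrop
    have hlen : full.length = j + 1 := by
      have := List.drop_eq_nil_iff.mp hdrop
      omega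
    simp only [bks, List.map_nil, List.nil_append, pwalk, outRef]
    have h1 : ((full.length : Nat) : Int) - 1 = ((j : Nat) : Int) := by rw [hlen]; push_cast; ring
    rw [h1]
    simp only [List.getD] at hs hp
    simp [PySem.List.pyGetD_natCast, List.getD, hs, hp]
  | cons y t ih =>
    intro j sIdx s p hj hsj hs hp hdrop
    have hy : full.getD (j + 1) (0, 0) = y := getD_of_drop hdrop
    have hj1 : j + 1 < full.length := by
      have : (full.drop (j + 1)).length = full.length - (j + 1) := List.length_drop ..
      rw [hdrop] at this; simp at this; omega
    have hdrop' : full.drop (j + 1 + 1) = t := by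
      have : full.drop (j + 1 + 1) = (full.drop (j + 1)).drop 1 := by
        rw [List.drop_drop]
      rw [this, hdrop]; rfl
    by_cases ha : adjB p y = true
    · simp only [bks, if_pos ha]
      have hmap : ((bks y t).map (· + 1)).map (fun k => k + (j + 1))
          = (bks y t).map (fun k => k + (j + 1 + 1)) := by
        rw [List.map_map]; apply List.map_congr_left; intro k _; simp; omega
      rw [hmap]
      have := ih (j + 1) sIdx s y hj1 (by omega) hs hy hdrop'
      rw [this]
      simp only [outRef, if_pos ha]
    · simp only [bks, if_neg ha]
      simp only [List.map_cons, List.cons_append, pwalk]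
      have hmap : ((bks y t).map (· + 1)).map (fun k => k + (j + 1))
          = (bks y t).map (fun k => k + (j + 1 + 1)) := by
        rw [List.map_map]; apply List.map_congr_left; intro k _; simp; omega
      rw [hmap]
      simp only [Nat.zero_add]
      have hrec := ih (j + 1) (j + 1) y y hj1 (le_refl _) hy hy hdrop'
      rw [hrec]
      simp only [outRef, if_neg ha]
      have h1 : (((j + 1) : Nat) : Int) - 1 = ((j : Nat) : Int) := by push_cast; ring
      rw [h1]
      simp only [List.getD] at hs hp
      simp [PySem.List.pyGetD_natCast, List.getD, hs, hp]

-- B-side: merge_adjacent_coords_alt computes outRef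
lemma alt_eq_outRef (x : Int × Int) (xs : List (Int × Int)) :
    merge_adjacent_coords_alt (x :: xs) = outRef x x xs := by
  unfold merge_adjacent_coords_alt
  simp only [PySem.List.slice_from_one]
  rw [PySem.List.pyRange_one]
  have hlen : (((x :: xs).length : Int) - 0).toNat = xs.length + 1 := by simp
  rw [hlen]
  have hmap : (List.range (xs.length + 1)).map (fun k : Nat => (0 : Int) + k)
      = (List.range (xs.length + 1)).map (fun k : Nat => (k : Int)) := by
    apply List.map_congr_left; intro k _; ring
  rw [hmap, List.filter_map]
  -- reduce the Int-level filter to the Nat-level one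
  have hfil : (List.range (xs.length + 1)).filter ((bBreak (x :: xs)) ∘ (fun k : Nat => (k : Int)))
      = 0 :: ((bks x xs).map (· + 1)) := by
    rw [List.range_succ_eq_map, List.filter_cons]
    have h0 : ((bBreak (x :: xs)) ∘ (fun k : Nat => (k : Int))) 0 = true := by
      simp [bBreak]
    rw [if_pos h0]
    have hcong : ∀ k : Nat, (((bBreak (x :: xs)) ∘ (fun k : Nat => (k : Int))) ∘ Nat.succ) k
        = (fun k => !(adjB (if k = 0 then x else xs.getD (k - 1) (0, 0)) (xs.getD k (0, 0)))) k := by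
      intro k
      show bBreak (x :: xs) ((Nat.succ k : Nat) : Int) = _
      have h1 : ((Nat.succ k : Nat) : Int) = (k : Int) + 1 := by push_cast; ring
      rw [h1, bBreak_succ]
      have hprev : (x :: xs).getD k (0, 0) = (if k = 0 then x else xs.getD (k - 1) (0, 0)) := by
        cases k <;> simp
      have hcur : (x :: xs).getD (k + 1) (0, 0) = xs.getD k (0, 0) := by simp
      rw [hprev, hcur]
    rw [List.filter_map, List.filter_congr (fun k _ => hcong k), filter_range_eq_bks xs x]
  rw [hfil]
  -- assemble the boundary list as a Nat list mapped into Int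
  have hall : ((0 :: (bks x xs).map (· + 1)).map (fun k : Nat => (k : Int))) ++ [((x :: xs).length : Int)]
      = ((0 :: (bks x xs).map (· + 1)) ++ [(x :: xs).length]).map (fun k : Nat => (k : Int)) := by
    simp
  rw [hall]
  rw [← List.map_tail, List.zip_map]
  rw [List.map_map]
  have hfun : ((fun se : Int × Int =>
        [(PySem.List.pyGetD (x :: xs) se.1 (0, 0)).1, (PySem.List.pyGetD (x :: xs) se.1 (0, 0)).2,
         (PySem.List.pyGetD (x :: xs) (se.2 - 1) (0, 0)).1, (PySem.List.pyGetD (x :: xs) (se.2 - 1) (0, 0)).2])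
        ∘ Prod.map (fun k : Nat => (k : Int)) (fun k : Nat => (k : Int)))
      = (fun se : Nat × Nat =>
        [(PySem.List.pyGetD (x :: xs) (se.1 : Int) (0, 0)).1, (PySem.List.pyGetD (x :: xs) (se.1 : Int) (0, 0)).2,
         (PySem.List.pyGetD (x :: xs) ((se.2 : Int) - 1) (0, 0)).1, (PySem.List.pyGetD (x :: xs) ((se.2 : Int) - 1) (0, 0)).2]) := by
    funext se; obtain ⟨a, b⟩ := se; rfl
  rw [hfun]
  have hz := zip_tail_pwalk (fun se : Nat × Nat =>
      [(PySem.List.pyGetD (x :: xs) (se.1 : Int) (0, 0)).1, (PySem.List.pyGetD (x :: xs) (se.1 : Int) (0, 0)).2,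
       (PySem.List.pyGetD (x :: xs) ((se.2 : Int) - 1) (0, 0)).1, (PySem.List.pyGetD (x :: xs) ((se.2 : Int) - 1) (0, 0)).2])
    ((bks x xs).map (· + 1) ++ [(x :: xs).length]) 0
  simp only [List.cons_append, List.tail_cons] at hz ⊢
  rw [hz]
  have hmap2 : (bks x xs).map (· + 1) = (bks x xs).map (fun k => k + (0 + 1)) := by
    apply List.map_congr_left; intro k _; omega
  rw [hmap2]
  exact pwalk_eq_outRef (x :: xs) xs 0 0 x x (by simp) (le_refl _) rfl rfl rfl

-- ===== VERDICT (by name: the statement is the Claim_ definition above) =====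
theorem merge_adjacent_coords_spec : Claim_equal_merge_adjacent_coords := by
  intro coords _ hpre
  unfold Spec_merge_adjacent_coords
  cases coords with
  | nil => exact absurd rfl hpre
  | cons x xs =>
    rw [alt_eq_outRef]
    show loopA (x.1, x.2, x.1, x.2) xs = outRef x x xs
    exact loopA_eq_outRef xs x x rfl
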